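-- pv_equiv track=rewrite | github.com/sk888ks/HTNQMC_open | examples/Heisenberg/_HT_calc_energy_qiskit_main.py | get_pauli_network_split
-- ===== SOURCE A (Python) =====
-- import itertools
--
-- def get_pauli_network_split(ham_pauli_list_flatten,network):#tested
--     #ネットワークで指定した順番にパウリ演算子を変更し、パウリ演算子をネットワークと同じリスト構造にする
--
--     temp_network_flatten=list(itertools.chain.from_iterable(network))
--
--     ham_pauli_list=[]
--     for plist in ham_pauli_list_flatten:
--         ham_pauli_list_temp_temp=[]
--         ##ネットワークで指定した順番にパウリ演算子を変更
--         for site_index in temp_network_flatten: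
--             ham_pauli_list_temp_temp.append(plist[-site_index-1])
--         n_network_idx=0
--         n_splitted_idx=0
--         ham_pauli_list_temp_temp_splitted=[]
--
--         #パウリ演算子をネットワークと同じリスト構造にする
--         while True:
--             ham_pauli_list_temp_temp_splitted.append(ham_pauli_list_temp_temp[n_splitted_idx:n_splitted_idx + len(network[n_network_idx])])
--             n_splitted_idx+=len(network[n_network_idx])
--             n_network_idx+=1
--             if n_splitted_idx==len(temp_network_flatten):
--                 break
--             elif n_splitted_idx>len(temp_network_flatten): #index数合わせ
--                 raise Exception("n_splitted_idx>len(temp_network_flatten)")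
--         ham_pauli_list.append(ham_pauli_list_temp_temp_splitted)
--     return ham_pauli_list
-- ===== SOURCE B (Python) =====
-- def get_pauli_network_split(ham_pauli_list_flatten, network):
--     # Build the network-shaped result directly: one nested comprehension,
--     # no flattening, no running slice index.
--     return [[[plist[-site_index - 1] for site_index in group] for group in network]
--             for plist in ham_pauli_list_flatten]
-- ===== Notes on version B (the rewrite author's own statement) =====
-- stated objective: simpler
-- what changed: B builds the network-shaped result with one direct nested comprehension over network's groups, replacing A's flatten-then-reorder pass plus a while-loop that re-slices the flat list with a running index counter.
-- intended difference: When ham_pauli_list_flatten is non-empty and network (of length >= 2) ends in one or more empty groups, A's while-loop breaks as soon as all flattened sites are consumed and silently drops those trailing empty groups, while B keeps them so each per-plist result has exactly network's shape, which is the function's stated purpose. — e.g. on get_pauli_network_split([["X", "Y"]], [[1], []]): A returns [[["X"]]], B returns [[["X"], []]]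
import Mathlib
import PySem

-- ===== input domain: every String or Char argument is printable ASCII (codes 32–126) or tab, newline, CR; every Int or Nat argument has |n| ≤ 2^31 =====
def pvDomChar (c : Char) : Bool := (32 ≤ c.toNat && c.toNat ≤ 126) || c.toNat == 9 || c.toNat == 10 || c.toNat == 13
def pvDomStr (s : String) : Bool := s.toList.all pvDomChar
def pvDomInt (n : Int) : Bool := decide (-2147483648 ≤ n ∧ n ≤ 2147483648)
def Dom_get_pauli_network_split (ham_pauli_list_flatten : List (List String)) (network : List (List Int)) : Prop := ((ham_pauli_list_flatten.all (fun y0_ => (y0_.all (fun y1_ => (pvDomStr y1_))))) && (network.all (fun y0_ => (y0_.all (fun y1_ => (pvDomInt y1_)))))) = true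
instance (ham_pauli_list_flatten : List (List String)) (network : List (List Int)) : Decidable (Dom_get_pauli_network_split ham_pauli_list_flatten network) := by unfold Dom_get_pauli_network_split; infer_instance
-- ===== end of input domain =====

-- B replaces A's flatten + running-index re-slicing while-loop by one direct nested map over
-- network's groups (objective: simpler); on trailing empty groups B keeps network's exact shape (D_ below).

-- ===== PORT A =====
-- plist[-site_index-1]; Pre_ guarantees the index is in range (Python raises IndexError otherwise)
def pvElem (plist : List String) (s : Int) : String :=
  (PySem.List.pyGet? plist (-s - 1)).getD ""

-- the 'while True' loop: appends ham_pauli_list_temp_temp[idx : idx+len(g)] group by group and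
-- breaks when idx reaches total; Python's network[n_network_idx] raises on an empty network
-- (excluded by Pre_) — the [] case returns the accumulator. The 'raise' branch
-- (idx > total) is unreachable since idx is always a partial sum of the group lengths.
def pvSplitLoop (tt : List String) (total : Nat) :
    List (List Int) → Nat → List (List String) → List (List String)
  | [], _, acc => acc
  | g :: rest, idx, acc =>
    let acc' := acc ++ [PySem.List.slice tt (some (idx : Int)) (some ((idx : Int) + (g.length : Int)))]
    let idx' := idx + g.length
    if idx' = total then acc' else pvSplitLoop tt total rest idx' acc'

def get_pauli_network_split (ham_pauli_list_flatten : List (List String)) (network : List (List Int)) : List (List (List String)) :=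
  let temp_network_flatten := network.flatten
  ham_pauli_list_flatten.map (fun plist =>
    let tt := temp_network_flatten.map (fun s => pvElem plist s)
    pvSplitLoop tt temp_network_flatten.length network 0 [])

-- ===== PORT B =====
def get_pauli_network_split_alt (ham_pauli_list_flatten : List (List String)) (network : List (List Int)) : List (List (List String)) :=
  ham_pauli_list_flatten.map (fun plist =>
    network.map (fun group => group.map (fun s => pvElem plist s)))

-- ===== PRECONDITION & SPEC =====
-- Pre_ excludes exactly the inputs where Python A raises: an empty network with a non-empty
-- ham list (IndexError at network[0]) and any site index out of range for some plist (IndexError).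
def Pre_get_pauli_network_split (ham_pauli_list_flatten : List (List String)) (network : List (List Int)) : Prop :=
  (network = [] → ham_pauli_list_flatten = []) ∧
  ∀ plist ∈ ham_pauli_list_flatten, ∀ g ∈ network, ∀ s ∈ g,
    -(plist.length : Int) ≤ s ∧ s < (plist.length : Int)
instance (ham_pauli_list_flatten : List (List String)) (network : List (List Int)) : Decidable (Pre_get_pauli_network_split ham_pauli_list_flatten network) := by unfold Pre_get_pauli_network_split; infer_instance

def pvWitness_get_pauli_network_split : List (List String) × List (List Int) :=
  ([["X", "Y"]], [[0], [1]])

-- When ham is non-empty and network (length ≥ 2) ends in an empty group, A drops the trailing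
-- empty group(s) (its while-loop breaks once all flattened sites are consumed) while B keeps
-- them, returning exactly network's shape — the function's stated purpose.
def D_get_pauli_network_split (ham_pauli_list_flatten : List (List String)) (network : List (List Int)) : Prop :=
  ham_pauli_list_flatten ≠ [] ∧ 2 ≤ network.length ∧ network.getLast? = some []
instance (ham_pauli_list_flatten : List (List String)) (network : List (List Int)) : Decidable (D_get_pauli_network_split ham_pauli_list_flatten network) := by unfold D_get_pauli_network_split; infer_instance

def Spec_get_pauli_network_split (ham_pauli_list_flatten : List (List String)) (network : List (List Int)) (out : List (List (List String))) : Prop := ¬ D_get_pauli_network_split ham_pauli_list_flatten network → out = get_pauli_network_split_alt ham_pauli_list_flatten network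
instance (ham_pauli_list_flatten : List (List String)) (network : List (List Int)) (out : List (List (List String))) : Decidable (Spec_get_pauli_network_split ham_pauli_list_flatten network out) := by unfold Spec_get_pauli_network_split; infer_instance

def pvDiffWitness_get_pauli_network_split : List (List String) × List (List Int) :=
  ([["X", "Y"]], [[1], []])
def pvDiffWitnessOut_get_pauli_network_split : (List (List (List String))) × (List (List (List String))) :=
  ([[["X"]]], [[["X"], []]])

-- ===== CLAIM (what is proved, stated in full; the proofs are below) =====
def Claim_unchanged_get_pauli_network_split : Prop := ∀ (ham_pauli_list_flatten : List (List String)) (network : List (List Int)), Dom_get_pauli_network_split ham_pauli_list_flatten network → Pre_get_pauli_network_split ham_pauli_list_flatten network → Spec_get_pauli_network_split ham_pauli_list_flatten network (get_pauli_network_split ham_pauli_list_flatten network)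
def Claim_changed_get_pauli_network_split : Prop := Dom_get_pauli_network_split (pvDiffWitness_get_pauli_network_split.1) (pvDiffWitness_get_pauli_network_split.2) ∧ Pre_get_pauli_network_split (pvDiffWitness_get_pauli_network_split.1) (pvDiffWitness_get_pauli_network_split.2) ∧ D_get_pauli_network_split (pvDiffWitness_get_pauli_network_split.1) (pvDiffWitness_get_pauli_network_split.2) ∧ get_pauli_network_split (pvDiffWitness_get_pauli_network_split.1) (pvDiffWitness_get_pauli_network_split.2) = pvDiffWitnessOut_get_pauli_network_split.1 ∧ get_pauli_network_split_alt (pvDiffWitness_get_pauli_network_split.1) (pvDiffWitness_get_pauli_network_split.2) = pvDiffWitnessOut_get_pauli_network_split.2 ∧ pvDiffWitnessOut_get_pauli_network_split.1 ≠ pvDiffWitnessOut_get_pauli_network_split.2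
def Claim_exact_get_pauli_network_split : Prop := ∀ (ham_pauli_list_flatten : List (List String)) (network : List (List Int)), Dom_get_pauli_network_split ham_pauli_list_flatten network → Pre_get_pauli_network_split ham_pauli_list_flatten network → D_get_pauli_network_split ham_pauli_list_flatten network → get_pauli_network_split ham_pauli_list_flatten network ≠ get_pauli_network_split_alt ham_pauli_list_flatten network

-- ===== LEMMAS AND PROOFS =====

lemma getLast?_cons_ne {A : Type} (a : A) (r : List A) (h : r ≠ []) :
    (a :: r).getLast? = r.getLast? := by
  rcases r with _ | ⟨b, t⟩
  · exact absurd rfl h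
  · exact List.getLast?_cons_cons

-- slicing out the middle block of pre ++ mid ++ rest
lemma slice_mid (pre mid rest : List String) (n : Nat) (h : mid.length = n) :
    PySem.List.slice (pre ++ mid ++ rest) (some (pre.length : Int))
      (some ((pre.length : Int) + (n : Int))) = mid := by
  subst h
  rw [PySem.List.slice_natCast_add]
  simp

-- the while-loop over a suffix gs whose last group is non-empty produces the per-group map
lemma pvSplitLoop_eq (f : Int → String) :
    ∀ (gs : List (List Int)), gs ≠ [] → (∀ l, gs.getLast? = some l → l ≠ []) →
    ∀ (pre : List String) (acc : List (List String)),
      pvSplitLoop (pre ++ gs.flatten.map f) (pre.length + (gs.flatten.map f).length)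
        gs pre.length acc = acc ++ gs.map (fun g => g.map f) := by
  intro gs
  induction gs with
  | nil => intro h; exact absurd rfl h
  | cons g rest ih =>
    intro _ hlast pre acc
    by_cases hr : rest = []
    · subst hr
      simp only [pvSplitLoop, List.flatten_cons, List.flatten_nil, List.append_nil]
      rw [show pre ++ List.map f g = pre ++ List.map f g ++ [] by simp,
        slice_mid pre (List.map f g) [] g.length (by simp)]
      simp
    · have hrl : ∀ l, rest.getLast? = some l → l ≠ [] := by
        intro l hl; exact hlast l (by rw [getLast?_cons_ne g rest hr]; exact hl)
      have hflat : rest.flatten ≠ [] := by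
        intro hf
        rcases hlg : rest.getLast? with _ | l
        · exact hr (List.getLast?_eq_none_iff.mp hlg)
        · have hmem : l ∈ rest := List.mem_of_getLast? hlg
          have : l = [] := by
            have := List.flatten_eq_nil_iff.mp hf
            exact this l hmem
          exact hrl l hlg this
      simp only [pvSplitLoop, List.flatten_cons, List.map_append]
      rw [← List.append_assoc,
        slice_mid pre (List.map f g) (List.map f rest.flatten) g.length (by simp)]
      have hne : pre.length + g.length ≠
          pre.length + (List.map f g ++ List.map f rest.flatten).length := by
        have : rest.flatten.length ≠ 0 := fun h0 => hflat (List.length_eq_zero_iff.mp h0)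
        simp only [List.length_append, List.length_map]
        omega
      rw [if_neg hne]
      have hidx : pre.length + g.length = (pre ++ List.map f g).length := by simp
      have htot : pre.length + (List.map f g ++ List.map f rest.flatten).length
          = (pre ++ List.map f g).length + (List.map f rest.flatten).length := by
        simp; omega
      rw [hidx, htot, ih hr hrl (pre ++ List.map f g) (acc ++ [List.map f g])]
      simp

-- per-plist equality when network's last group is non-empty
lemma perPlist_eq (network : List (List Int)) (plist : List String)
    (hne : network ≠ []) (hlast : ∀ l, network.getLast? = some l → l ≠ []) :
    pvSplitLoop (network.flatten.map (fun s => pvElem plist s)) network.flatten.length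
      network 0 [] = network.map (fun g => g.map (fun s => pvElem plist s)) := by
  have := pvSplitLoop_eq (fun s => pvElem plist s) network hne hlast [] []
  simp only [List.nil_append, List.length_nil, Nat.zero_add, List.length_map] at this
  exact this

-- the loop's output has fewer entries than network has groups when the last
-- group is empty and there are at least two groups
lemma pvSplitLoop_len_lt (tt : List String) :
    ∀ (gs : List (List Int)), 2 ≤ gs.length → gs.getLast? = some [] →
    ∀ (idx : Nat) (acc : List (List String)),
      (pvSplitLoop tt (idx + gs.flatten.length) gs idx acc).length < acc.length + gs.length := by
  intro gs
  induction gs with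
  | nil => intro h; simp at h
  | cons g rest ih =>
    intro hlen hlast idx acc
    have hr : rest ≠ [] := by
      intro h; subst h; simp at hlen
    rw [getLast?_cons_ne g rest hr] at hlast
    simp only [pvSplitLoop, List.flatten_cons, List.length_append]
    by_cases hflat : rest.flatten.length = 0
    · rw [if_pos (by omega)]
      have : 1 ≤ rest.length := List.length_pos_of_ne_nil hr
      simp only [List.length_append, List.length_cons, List.length_nil]
      simp
      omega
    · rw [if_neg (by omega)]
      have hrlen : 2 ≤ rest.length := by
        rcases rest with _ | ⟨a, rest'⟩
        · exact absurd rfl hr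
        · rcases rest' with _ | _
          · exfalso
            simp at hlast
            subst hlast
            simp at hflat
          · simp
      have := ih hrlen hlast (idx + g.length)
        (acc ++ [PySem.List.slice tt (some (idx : Int)) (some ((idx : Int) + (g.length : Int)))])
      have harith : idx + g.length + rest.flatten.length
          = idx + (g.length + rest.flatten.length) := by omega
      rw [harith] at this
      simp only [List.length_append, List.length_cons, List.length_nil] at this ⊢
      omega

-- ===== VERDICT (by name: the statement is the Claim_ definition above) =====
theorem get_pauli_network_split_spec : Claim_unchanged_get_pauli_network_split := by
  intro ham network _ hpre
  unfold Spec_get_pauli_network_split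
  intro hnd
  unfold get_pauli_network_split get_pauli_network_split_alt
  rcases ham with _ | ⟨p, ham'⟩
  · simp
  · have hham : (p :: ham') ≠ ([] : List (List String)) := by simp
    unfold D_get_pauli_network_split at hnd
    push Not at hnd
    by_cases hne : network = []
    · exact absurd (hpre.1 hne) hham
    · rcases h2 : network.getLast? with _ | l
      · exact absurd (List.getLast?_eq_none_iff.mp h2) hne
      · by_cases hl : l = []
        · subst hl
          -- last group empty but ¬D_ forces network.length < 2, so network = [[]]
          have hlt : network.length < 2 := by
            by_contra hge
            exact (hnd hham (by omega)) h2
          have hnw : network = [[]] := by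
            rcases network with _ | ⟨a, rest⟩
            · exact absurd rfl hne
            · rcases rest with _ | _
              · simp at h2; simp [h2]
              · simp at hlt
          subst hnw
          simp [pvSplitLoop, PySem.List.slice]
        · have hlast : ∀ l', network.getLast? = some l' → l' ≠ [] := by
            intro l' hl'; rw [h2] at hl'; cases hl'; exact hl
          apply List.map_congr_left
          intro q _
          exact perPlist_eq network q hne hlast

theorem get_pauli_network_split_changed : Claim_changed_get_pauli_network_split := by
  unfold Claim_changed_get_pauli_network_split; decide

theorem get_pauli_network_split_tight : Claim_exact_get_pauli_network_split := by
  intro ham network _ _ hd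
  obtain ⟨hham, hlen2, hlast⟩ := hd
  rcases ham with _ | ⟨p, ham'⟩
  · exact absurd rfl hham
  · intro heq
    unfold get_pauli_network_split get_pauli_network_split_alt at heq
    simp only [List.map_cons, List.cons.injEq] at heq
    have h1 := heq.1
    have hA := pvSplitLoop_len_lt (network.flatten.map (fun s => pvElem p s))
      network hlen2 hlast 0 []
    simp only [Nat.zero_add] at hA
    rw [h1] at hA
    simp at hA
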